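-- pv_equiv track=rewrite | github.com/Dylanlafranky/ARA-GIT | 243BL9_randomness_terrain.py | make_numbers
-- ===== SOURCE A (Python) =====
-- def make_numbers(digits, window=3):
--     """Convert digit sequence to numbers for Benford analysis."""
--     nums = []
--     for i in range(len(digits) - window + 1):
--         n = 0
--         for j in range(window):
--             n = n * 10 + digits[i + j]
--         if n > 0:
--             nums.append(n)
--     return nums
-- ===== SOURCE B (Python) =====
-- def make_numbers(digits, window=3):
--     """Convert digit sequence to numbers for Benford analysis (rolling window)."""
--     if window <= 0 or len(digits) < window:
--         return []
--     p = 10 ** (window - 1)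
--     n = 0
--     for d in digits[:window]:
--         n = n * 10 + d
--     nums = [n] if n > 0 else []
--     for i in range(window, len(digits)):
--         n = (n - digits[i - window] * p) * 10 + digits[i]
--         if n > 0:
--             nums.append(n)
--     return nums
-- ===== Notes on version B (the rewrite author's own statement) =====
-- stated objective: faster
-- what changed: Replaces the per-position inner loop that rebuilds each window value from scratch by a single pass that updates the window value incrementally (subtract the leaving digit times 10^(window-1), shift, add the entering digit).
import Mathlib
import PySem

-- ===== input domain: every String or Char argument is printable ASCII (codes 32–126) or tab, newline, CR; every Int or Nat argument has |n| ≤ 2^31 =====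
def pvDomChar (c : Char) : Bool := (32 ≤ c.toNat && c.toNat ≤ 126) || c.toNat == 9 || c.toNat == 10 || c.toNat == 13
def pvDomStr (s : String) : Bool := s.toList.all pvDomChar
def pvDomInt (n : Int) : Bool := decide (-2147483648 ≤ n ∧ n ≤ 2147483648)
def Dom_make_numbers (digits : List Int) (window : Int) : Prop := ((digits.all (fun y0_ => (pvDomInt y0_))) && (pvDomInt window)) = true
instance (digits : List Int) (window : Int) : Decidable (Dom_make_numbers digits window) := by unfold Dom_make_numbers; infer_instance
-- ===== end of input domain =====

-- B replaces A's per-position inner loop (rebuilds each window value from scratch) by a single pass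
-- updating the window value incrementally; return values are proved equal on all inputs.

-- ===== PORT A =====
def make_numbers (digits : List Int) (window : Int) : List Int :=
  (PySem.List.pyRange 0 (PySem.List.len digits - window + 1) 1).foldl (fun nums i =>
    let n := (PySem.List.pyRange 0 window 1).foldl
      (fun n j => n * 10 + PySem.List.pyGetD digits (i + j) 0) 0
    if n > 0 then nums ++ [n] else nums) []

-- ===== PORT B =====
def make_numbers_alt (digits : List Int) (window : Int) : List Int :=
  if window ≤ 0 ∨ PySem.List.len digits < window then []
  else
    let p : Int := 10 ^ (window - 1).toNat
    let n0 : Int := (PySem.List.slice digits none (some window)).foldl (fun n d => n * 10 + d) 0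
    let nums : List Int := if n0 > 0 then [n0] else []
    ((PySem.List.pyRange window (PySem.List.len digits) 1).foldl
      (fun (st : List Int × Int) i =>
        let n := (st.2 - PySem.List.pyGetD digits (i - window) 0 * p) * 10 + PySem.List.pyGetD digits i 0
        (if n > 0 then st.1 ++ [n] else st.1, n)) (nums, n0)).1

-- ===== PRECONDITION & SPEC =====
def Spec_make_numbers (digits : List Int) (window : Int) (out : List Int) : Prop := out = make_numbers_alt digits window
instance (digits : List Int) (window : Int) (out : List Int) : Decidable (Spec_make_numbers digits window out) := by unfold Spec_make_numbers; infer_instance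

-- ===== CLAIM (what is proved, stated in full; the proofs are below) =====
def Claim_equal_make_numbers : Prop := ∀ (digits : List Int) (window : Int), Dom_make_numbers digits window → Spec_make_numbers digits window (make_numbers digits window)

-- ===== LEMMAS AND PROOFS =====
def pvVal (digits : List Int) (w i : Nat) : Int :=
  ((digits.drop i).take w).foldl (fun n d => n * 10 + d) 0

lemma pv_shift (xs : List Int) (a : Int) :
    xs.foldl (fun n d => n * 10 + d) a = a * 10 ^ xs.length + xs.foldl (fun n d => n * 10 + d) 0 := by
  induction xs generalizing a with
  | nil => simp
  | cons x t ih =>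
    simp only [List.foldl_cons, List.length_cons]
    rw [ih (a * 10 + x), ih (0 * 10 + x)]; ring

lemma pv_roll (digits : List Int) (w i : Nat) (hw : 1 ≤ w) (h : i + w < digits.length) :
    pvVal digits w (i + 1)
      = (pvVal digits w i - digits.getD i 0 * 10 ^ (w - 1)) * 10 + digits.getD (i + w) 0 := by
  obtain ⟨v, rfl⟩ : ∃ v, w = v + 1 := ⟨w - 1, by omega⟩
  have hi : i < digits.length := by omega
  have hiw : i + (v + 1) < digits.length := h
  have h1 : (digits.drop i).take (v + 1) = digits[i] :: (digits.drop (i + 1)).take v := by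
    rw [List.drop_eq_getElem_cons hi, List.take_succ_cons]
  have h2 : (digits.drop (i + 1)).take (v + 1) = (digits.drop (i + 1)).take v ++ [digits[i + (v + 1)]] := by
    rw [List.take_add_one, List.getElem?_drop]
    have : i + 1 + v = i + (v + 1) := by omega
    rw [this, List.getElem?_eq_getElem hiw]; rfl
  have hmid : ((digits.drop (i + 1)).take v).length = v := by
    simp [List.length_take, List.length_drop]; omega
  unfold pvVal
  rw [h2, h1, List.foldl_append]
  simp only [List.foldl_cons, List.foldl_nil, Nat.add_sub_cancel]
  rw [pv_shift ((digits.drop (i + 1)).take v) (0 * 10 + digits[i]), hmid,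
      List.getD_eq_getElem digits 0 hi, List.getD_eq_getElem digits 0 hiw]
  ring

lemma pv_inner (digits : List Int) (w i : Nat) (h : i + w ≤ digits.length) :
    (List.range w).foldl (fun n j => n * 10 + digits.getD (i + j) 0) 0
      = pvVal digits w i := by
  unfold pvVal
  induction w with
  | zero => simp
  | succ k ih =>
    have hk : i + k < digits.length := by omega
    rw [List.range_succ, List.foldl_append, ih (by omega)]
    have ht : (digits.drop i).take (k + 1) = (digits.drop i).take k ++ [digits[i + k]] := by
      rw [List.take_add_one, List.getElem?_drop, List.getElem?_eq_getElem hk]; rfl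
    rw [ht, List.foldl_append]
    simp only [List.foldl_cons, List.foldl_nil]
    rw [List.getD_eq_getElem digits 0 hk]

lemma A_char (digits : List Int) (window : Int) (hw : 1 ≤ window) (hl : window ≤ (digits.length : Int)) :
    make_numbers digits window
      = ((List.range (digits.length - window.toNat + 1)).filter
            (fun i => decide (0 < pvVal digits window.toNat i))).map
          (fun i => pvVal digits window.toNat i) := by
  unfold make_numbers
  rw [PySem.List.len_eq, PySem.List.pyRange_one, PySem.List.pyRange_one, List.foldl_map]
  have hcount : ((digits.length : Int) - window + 1 - 0).toNat = digits.length - window.toNat + 1 := by omega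
  rw [hcount]
  rw [List.foldl_ext _ (fun nums (k : Nat) =>
        if 0 < pvVal digits window.toNat k then nums ++ [pvVal digits window.toNat k] else nums) []
      ?_]
  · rw [PySem.List.foldl_append_ite (fun k => 0 < pvVal digits window.toNat k)
        (fun k => pvVal digits window.toNat k)]
    simp
  · intro nums k hk
    rw [List.mem_range] at hk
    have hval : List.foldl (fun n j => n * 10 + PySem.List.pyGetD digits ((0 : Int) + ↑k + j) 0) 0
        ((List.range (window - 0).toNat).map (fun j : Nat => (0 : Int) + ↑j))
        = pvVal digits window.toNat k := by
      rw [List.foldl_map]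
      have h0 : (window - 0).toNat = window.toNat := by omega
      rw [h0, ← pv_inner digits window.toNat k (by omega)]
      apply List.foldl_ext
      intro n j hj
      have : (0 : Int) + ↑k + ((0 : Int) + ↑j) = ((k + j : Nat) : Int) := by push_cast; ring
      rw [this, PySem.List.pyGetD_natCast]
    simp only [hval]

lemma B_inv (digits : List Int) (w : Nat) (hw : 1 ≤ w) (hl : w ≤ digits.length)
    (acc0 : List Int) (m : Nat) (hm : m ≤ digits.length - w) :
    (List.range m).foldl (fun (st : List Int × Int) (k : Nat) =>
        ((if 0 < (st.2 - digits.getD k 0 * 10 ^ (w - 1)) * 10 + digits.getD (w + k) 0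
          then st.1 ++ [(st.2 - digits.getD k 0 * 10 ^ (w - 1)) * 10 + digits.getD (w + k) 0]
          else st.1),
         (st.2 - digits.getD k 0 * 10 ^ (w - 1)) * 10 + digits.getD (w + k) 0)) (acc0, pvVal digits w 0)
      = (acc0 ++ ((List.range m).filter (fun k => decide (0 < pvVal digits w (k + 1)))).map
            (fun k => pvVal digits w (k + 1)), pvVal digits w m) := by
  induction m with
  | zero => simp
  | succ t ih =>
    rw [List.range_succ, List.foldl_append, ih (by omega), List.filter_append, List.map_append]
    have hroll : pvVal digits w (t + 1)
        = (pvVal digits w t - digits.getD t 0 * 10 ^ (w - 1)) * 10 + digits.getD (t + w) 0 :=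
      pv_roll digits w t hw (by omega)
    simp only [List.foldl_cons, List.foldl_nil]
    have hc : w + t = t + w := by omega
    rw [hc, ← hroll]
    by_cases hpos : 0 < pvVal digits w (t + 1)
    · simp [hpos]
    · simp [hpos]

lemma pv_main (digits : List Int) (window : Int) :
    make_numbers digits window = make_numbers_alt digits window := by
  by_cases hw : window ≤ 0
  · unfold make_numbers make_numbers_alt
    rw [if_pos (Or.inl hw)]
    rw [List.foldl_ext _ (fun (nums : List Int) (_ : Int) => nums) [] ?_]
    · exact List.foldl_fixed' (fun _ => rfl) _
    · intro nums i _
      simp [PySem.List.pyRange_one_eq_nil hw]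
  · rw [not_le] at hw
    by_cases hl : (digits.length : Int) < window
    · unfold make_numbers make_numbers_alt
      rw [if_pos (Or.inr (by simpa [PySem.List.len_eq] using hl))]
      rw [PySem.List.len_eq,
          PySem.List.pyRange_one_eq_nil (a := 0) (b := (digits.length : Int) - window + 1) (by omega)]
      rfl
    · rw [not_lt] at hl
      have hw1 : 1 ≤ window.toNat := by omega
      have hwl : window.toNat ≤ digits.length := by omega
      have hn0 : (digits.take window.toNat).foldl (fun n d => n * 10 + d) 0
          = pvVal digits window.toNat 0 := by
        unfold pvVal; rw [List.drop_zero]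
      have hp : (window - 1).toNat = window.toNat - 1 := by omega
      have hcnt : ((digits.length : Int) - window).toNat = digits.length - window.toNat := by omega
      rw [A_char digits window (by omega) hl]
      unfold make_numbers_alt
      rw [if_neg (by simp only [PySem.List.len_eq]; omega)]
      simp only [PySem.List.len_eq, PySem.List.slice_to digits (show (0:Int) ≤ window by omega),
        PySem.List.pyRange_one, List.foldl_map, hn0, hp, hcnt]
      rw [List.foldl_ext _ (fun (st : List Int × Int) (k : Nat) =>
          ((if 0 < (st.2 - digits.getD k 0 * 10 ^ (window.toNat - 1)) * 10
                  + digits.getD (window.toNat + k) 0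
            then st.1 ++ [(st.2 - digits.getD k 0 * 10 ^ (window.toNat - 1)) * 10
                  + digits.getD (window.toNat + k) 0]
            else st.1),
           (st.2 - digits.getD k 0 * 10 ^ (window.toNat - 1)) * 10
                  + digits.getD (window.toNat + k) 0)) _ ?_]
      · rw [B_inv digits window.toNat hw1 hwl _ (digits.length - window.toNat) (le_refl _)]
        rw [List.range_succ_eq_map]
        by_cases h0 : 0 < pvVal digits window.toNat 0
        · simp [h0, List.filter_map, List.map_map, Function.comp_def]
        · simp [h0, List.filter_map, List.map_map, Function.comp_def]
      · intro st k hk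
        rw [List.mem_range] at hk
        have h2 : window + (k : Int) = ((window.toNat + k : Nat) : Int) := by push_cast; omega
        have h1 : ((window.toNat + k : Nat) : Int) - window = ((k : Nat) : Int) := by push_cast; omega
        simp only [h2, h1, PySem.List.pyGetD_natCast]

-- ===== VERDICT (by name: the statement is the Claim_ definition above) =====
theorem make_numbers_spec : Claim_equal_make_numbers := by
  intro digits window _
  unfold Spec_make_numbers
  exact pv_main digits window
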